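-- pv_equiv track=rewrite | github.com/mmsa/EmoTFIDF | EmoTFIDF/evidence/rules.py | find_negation_in_window
-- ===== SOURCE A (Python) =====
-- from typing import Dict, FrozenSet, List, Optional, Tuple
--
-- NEGATION_CUES: FrozenSet[str] = frozenset(
--     {
--         "not",
--         "never",
--         "no",
--         "hardly",
--         "barely",
--         "cannot",
--         "can't",
--         "cant",
--         "don't",
--         "dont",
--         "didn't",
--         "didnt",
--         "isn't",
--         "isnt",
--         "wasn't",
--         "wasnt",
--         "won't",
--         "wont",
--         "n't",  # rare standalone after tokenizer splits
--     }
-- )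
--
-- def find_negation_in_window(
--     tokens: List[str],
--     affect_index: int,
--     window: int,
-- ) -> Optional[Tuple[str, int]]:
--     """
--     Return (cue, cue_index) for the closest negation cue within *window* tokens before *affect_index*.
--     """
--     start = max(0, affect_index - window)
--     best: Optional[Tuple[str, int]] = None
--     for j in range(affect_index - 1, start - 1, -1):
--         w = tokens[j]
--         if w in NEGATION_CUES:
--             best = (w, j)
--             break
--     return best
-- ===== SOURCE B (Python) =====
-- NEGATION_CUES = frozenset(
--     {
--         "not", "never", "no", "hardly", "barely", "cannot", "can't", "cant",
--         "don't", "dont", "didn't", "didnt", "isn't", "isnt", "wasn't", "wasnt",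
--         "won't", "wont", "n't",
--     }
-- )
--
--
-- def find_negation_in_window(tokens, affect_index, window):
--     # Inverted nesting: for each cue in the lexicon, search the window for it,
--     # keeping the largest matching index; the max index is the closest cue.
--     start = max(0, affect_index - window)
--     best_j = -1
--     for cue in NEGATION_CUES:
--         for j in range(start, affect_index):
--             if tokens[j] == cue and j > best_j:
--                 best_j = j
--     if best_j < 0:
--         return None
--     return (tokens[best_j], best_j)
-- ===== Notes on version B (the rewrite author's own statement) =====
-- stated objective: alternative
-- what changed: Inverts the loop nesting: instead of scanning window positions and testing set membership with an early break, B iterates over the cue lexicon, searches the whole window for each cue, and keeps the maximal matching index, reading the token back at the end.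
import Mathlib
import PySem

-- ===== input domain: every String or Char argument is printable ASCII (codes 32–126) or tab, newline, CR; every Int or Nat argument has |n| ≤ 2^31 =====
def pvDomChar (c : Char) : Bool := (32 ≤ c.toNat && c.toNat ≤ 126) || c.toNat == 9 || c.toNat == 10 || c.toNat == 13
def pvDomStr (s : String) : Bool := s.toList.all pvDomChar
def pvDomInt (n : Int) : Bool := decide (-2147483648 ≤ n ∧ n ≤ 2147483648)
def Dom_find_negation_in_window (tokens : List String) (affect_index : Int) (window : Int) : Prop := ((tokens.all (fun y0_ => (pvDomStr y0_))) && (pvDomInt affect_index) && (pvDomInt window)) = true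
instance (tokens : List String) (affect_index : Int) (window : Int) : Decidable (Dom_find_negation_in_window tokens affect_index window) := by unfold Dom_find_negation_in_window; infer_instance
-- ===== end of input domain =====

-- B inverts the loop nesting (iterate the cue lexicon, search the window per cue, keep the
-- maximal matching index) instead of A's backward early-exit position scan; proved equal on Pre_.


-- the frozenset NEGATION_CUES as a list of its distinct members
def negationCues : List String :=
  ["not", "never", "no", "hardly", "barely", "cannot", "can't", "cant",
   "don't", "dont", "didn't", "didnt", "isn't", "isnt", "wasn't", "wasnt",
   "won't", "wont", "n't"]

-- ===== PORT A =====
-- loop 'for j in range(affect_index-1, start-1, -1): w = tokens[j]; if w in cues: best=(w,j); break'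
-- tokens[j] is pyGet?; 'none' is Python's IndexError (excluded by Pre_), the port stops with none there.
def loopA (tokens : List String) : List Int → Option (String × Int)
  | [] => none
  | j :: rest =>
    match PySem.List.pyGet? tokens j with
    | none => none
    | some w => if negationCues.contains w then some (w, j) else loopA tokens rest

def find_negation_in_window (tokens : List String) (affect_index : Int) (window : Int) : Option (String × Int) :=
  let start := max 0 (affect_index - window)
  loopA tokens (PySem.List.pyRange (affect_index - 1) (start - 1) (-1))

-- ===== PORT B =====
-- inner loop body 'if tokens[j] == cue and j > best_j: best_j = j'
-- tokens[j] is pyGet?; 'none' is Python's IndexError (excluded by Pre_); the port keeps the accumulator there.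
def stepB (tokens : List String) (cue : String) (a : Int) (j : Int) : Int :=
  match PySem.List.pyGet? tokens j with
  | none => a
  | some w => if w = cue ∧ j > a then j else a

def find_negation_in_window_alt (tokens : List String) (affect_index : Int) (window : Int) : Option (String × Int) :=
  let start := max 0 (affect_index - window)
  let bestJ := negationCues.foldl
    (fun acc cue => (PySem.List.pyRange start affect_index 1).foldl (stepB tokens cue) acc) (-1)
  if bestJ < 0 then none
  else match PySem.List.pyGet? tokens bestJ with   -- 'return (tokens[best_j], best_j)'
       | none => none
       | some w => some (w, bestJ)

-- ===== PRECONDITION & SPEC =====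
-- Pre_ excludes exactly the inputs where Python A raises IndexError (affect_index beyond the
-- list with a positive window); both Pythons raise there.
def Pre_find_negation_in_window (tokens : List String) (affect_index : Int) (window : Int) : Prop :=
  affect_index ≤ tokens.length ∨ window ≤ 0
instance (tokens : List String) (affect_index : Int) (window : Int) : Decidable (Pre_find_negation_in_window tokens affect_index window) := by unfold Pre_find_negation_in_window; infer_instance

def pvWitness_find_negation_in_window : List String × Int × Int := (["we", "did", "not", "go"], 3, 2)

def Spec_find_negation_in_window (tokens : List String) (affect_index : Int) (window : Int) (out : Option (String × Int)) : Prop := out = find_negation_in_window_alt tokens affect_index window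
instance (tokens : List String) (affect_index : Int) (window : Int) (out : Option (String × Int)) : Decidable (Spec_find_negation_in_window tokens affect_index window out) := by unfold Spec_find_negation_in_window; infer_instance

-- ===== CLAIM (what is proved, stated in full; the proofs are below) =====
def Claim_equal_find_negation_in_window : Prop := ∀ (tokens : List String) (affect_index : Int) (window : Int), Dom_find_negation_in_window tokens affect_index window → Pre_find_negation_in_window tokens affect_index window → Spec_find_negation_in_window tokens affect_index window (find_negation_in_window tokens affect_index window)

-- ===== LEMMAS AND PROOFS =====

-- 'tokens[j] is a cue' as one Boolean test (false on IndexError)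
def isCueAt (tokens : List String) (j : Int) : Bool :=
  match PySem.List.pyGet? tokens j with
  | none => false
  | some w => negationCues.contains w

lemma foldl_id_str (cs : List String) (a : Int) : cs.foldl (fun acc _ => acc) a = a := by
  induction cs with
  | nil => rfl
  | cons c cs ih => simpa using ih

lemma foldl_max_pull (L : List Int) (x a : Int) :
    L.foldl max (max x a) = max x (L.foldl max a) := by
  induction L generalizing a with
  | nil => rfl
  | cons b L ih =>
    simp only [List.foldl_cons]
    rw [max_assoc, ih]

lemma stepB_eq (tokens : List String) (cue : String) (a j : Int) :
    stepB tokens cue a j =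
      if PySem.List.pyGet? tokens j = some cue then max a j else a := by
  unfold stepB
  cases h : PySem.List.pyGet? tokens j with
  | none => simp
  | some w =>
    show (if w = cue ∧ j > a then j else a) = if some w = some cue then max a j else a
    by_cases hw : w = cue
    · subst hw
      rw [if_pos rfl]
      by_cases hj : j > a
      · rw [if_pos ⟨rfl, hj⟩]; omega
      · rw [if_neg (fun hcon => hj hcon.2)]; omega
    · rw [if_neg (fun hcon => hw hcon.1), if_neg (fun hcon => hw (Option.some.inj hcon))]

lemma innerB_eq (tokens : List String) (cue : String) (R : List Int) (acc : Int) :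
    R.foldl (stepB tokens cue) acc =
      (R.filter (fun j => decide (PySem.List.pyGet? tokens j = some cue))).foldl max acc := by
  induction R generalizing acc with
  | nil => rfl
  | cons j R ih =>
    simp only [List.foldl_cons, List.filter_cons, stepB_eq]
    by_cases h : PySem.List.pyGet? tokens j = some cue
    · simp only [if_pos h, h, decide_true, List.foldl_cons]; exact ih _
    · simp only [if_neg h, h, decide_false]; exact ih _

lemma outer_pull (tokens : List String) (cs : List String) (R : List Int) (x a : Int) :
    cs.foldl (fun acc cue =>
        (R.filter (fun j => decide (PySem.List.pyGet? tokens j = some cue))).foldl max acc) (max x a)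
    = max x (cs.foldl (fun acc cue =>
        (R.filter (fun j => decide (PySem.List.pyGet? tokens j = some cue))).foldl max acc) a) := by
  induction cs generalizing a with
  | nil => rfl
  | cons c cs ih =>
    simp only [List.foldl_cons]
    rw [foldl_max_pull, ih]

lemma outer_cons (tokens : List String) (cs : List String) (j : Int) (R : List Int) (a : Int) :
    cs.foldl (fun acc cue =>
        ((j :: R).filter (fun j' => decide (PySem.List.pyGet? tokens j' = some cue))).foldl max acc) a
    = if cs.any (fun cue => decide (PySem.List.pyGet? tokens j = some cue)) then
        max j (cs.foldl (fun acc cue =>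
          (R.filter (fun j' => decide (PySem.List.pyGet? tokens j' = some cue))).foldl max acc) a)
      else
        cs.foldl (fun acc cue =>
          (R.filter (fun j' => decide (PySem.List.pyGet? tokens j' = some cue))).foldl max acc) a := by
  induction cs generalizing a with
  | nil => rfl
  | cons c cs ih =>
    simp only [List.foldl_cons, List.any_cons]
    rw [List.filter_cons]
    by_cases hc : PySem.List.pyGet? tokens j = some c
    · rw [if_pos (by simpa using hc), List.foldl_cons, max_comm a j, foldl_max_pull, ih,
        show (decide (PySem.List.pyGet? tokens j = some c)
          || cs.any fun cue => decide (PySem.List.pyGet? tokens j = some cue)) = true by simp [hc]]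
      rw [if_pos rfl]
      by_cases hany : (cs.any fun cue => decide (PySem.List.pyGet? tokens j = some cue)) = true
      · rw [if_pos hany, outer_pull, ← max_assoc, max_self]
      · rw [if_neg hany, outer_pull]
    · rw [if_neg (by simpa using hc), ih,
        show (decide (PySem.List.pyGet? tokens j = some c)
          || cs.any fun cue => decide (PySem.List.pyGet? tokens j = some cue))
         = (cs.any fun cue => decide (PySem.List.pyGet? tokens j = some cue)) by simp [hc]]

lemma outer_eq_filter (tokens : List String) (cs : List String) (R : List Int) (a : Int) :
    cs.foldl (fun acc cue =>
        (R.filter (fun j => decide (PySem.List.pyGet? tokens j = some cue))).foldl max acc) a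
    = (R.filter (fun j => cs.any (fun cue => decide (PySem.List.pyGet? tokens j = some cue)))).foldl max a := by
  induction R generalizing a with
  | nil => simpa using foldl_id_str cs a
  | cons j R ih =>
    rw [outer_cons, List.filter_cons]
    by_cases h : (cs.any fun cue => decide (PySem.List.pyGet? tokens j = some cue)) = true
    · rw [if_pos h, if_pos (by simpa using h), ih, List.foldl_cons, max_comm a j, foldl_max_pull]
    · rw [if_neg h, if_neg (by simpa using h), ih]

lemma any_eq_isCueAt (tokens : List String) (j : Int) :
    negationCues.any (fun cue => decide (PySem.List.pyGet? tokens j = some cue)) = isCueAt tokens j := by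
  unfold isCueAt
  cases h : PySem.List.pyGet? tokens j with
  | none => simp [h]
  | some w =>
    simp only [h, Option.some.injEq]
    rw [Bool.eq_iff_iff, List.any_eq_true]
    simp only [decide_eq_true_eq, List.contains_eq_mem, decide_eq_true_eq]
    constructor
    · rintro ⟨c, hc, rfl⟩; exact hc
    · intro hw; exact ⟨w, hw, rfl⟩

-- A's early-exit loop is the first hit of the scanned index list (all indices in range)
lemma loopA_eq_find? (tokens : List String) (L : List Int)
    (h : ∀ j ∈ L, (PySem.List.pyGet? tokens j).isSome) :
    loopA tokens L = (L.find? (isCueAt tokens)).bind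
      (fun j => (PySem.List.pyGet? tokens j).map (fun w => (w, j))) := by
  induction L with
  | nil => rfl
  | cons j L ih =>
    obtain ⟨w, hw⟩ := Option.isSome_iff_exists.mp (h j (by simp))
    have hcue : isCueAt tokens j = negationCues.contains w := by unfold isCueAt; rw [hw]
    have hred : loopA tokens (j :: L)
        = if negationCues.contains w then some (w, j) else loopA tokens L := by
      conv_lhs => rw [loopA]
      rw [hw]
    rw [hred]
    by_cases hc : negationCues.contains w = true
    · rw [if_pos hc, List.find?_cons_of_pos (by rw [hcue]; exact hc)]
      simp [hw]
    · rw [if_neg (by simpa using hc),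
        List.find?_cons_of_neg (by rw [hcue]; simpa using hc)]
      exact ih (fun j' hj' => h j' (by simp [hj']))

lemma find?_eq_head?_filter' {p : Int → Bool} (L : List Int) :
    L.find? p = (L.filter p).head? := by
  induction L with
  | nil => rfl
  | cons a L ih =>
    rw [List.filter_cons]
    by_cases h : p a = true
    · rw [List.find?_cons_of_pos h, if_pos h, List.head?_cons]
    · rw [List.find?_cons_of_neg (by simpa using h), if_neg (by simpa using h), ih]

lemma foldl_max_concat_sorted (F : List Int) (m : Int)
    (hlt : ∀ y ∈ F, y < m) (hm : -1 ≤ m) :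
    (F ++ [m]).foldl max (-1) = m := by
  rw [List.foldl_append]
  simp only [List.foldl_cons, List.foldl_nil]
  rcases PySem.List.foldl_max_mem F (-1) with h | h
  · rw [h]; omega
  · have := hlt _ h; omega

-- ===== VERDICT (by name: the statement is the Claim_ definition above) =====
theorem find_negation_in_window_spec : Claim_equal_find_negation_in_window := by
  intro tokens affect_index window _ hpre
  unfold Spec_find_negation_in_window find_negation_in_window find_negation_in_window_alt
  have h0start : (0 : Int) ≤ max 0 (affect_index - window) := le_max_left _ _
  have hinr : ∀ j ∈ PySem.List.pyRange (max 0 (affect_index - window)) affect_index 1,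
      (PySem.List.pyGet? tokens j).isSome := by
    intro j hj
    rw [PySem.List.mem_pyRange_one] at hj
    have hlen : j < tokens.length := by
      rcases hpre with h | h
      · omega
      · exfalso; omega
    rw [Option.isSome_iff_ne_none, Ne, PySem.List.pyGet?_eq_none_iff]
    simp only [PySem.Raise.InRange, not_and, not_lt]
    omega
  have hr : PySem.List.pyRange (affect_index - 1) (max 0 (affect_index - window) - 1) (-1)
      = (PySem.List.pyRange (max 0 (affect_index - window)) affect_index 1).reverse := by
    rw [PySem.List.pyRange_neg_one_eq_reverse]; norm_num
  dsimp only
  set R := PySem.List.pyRange (max 0 (affect_index - window)) affect_index 1 with hR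
  -- A side: first hit of the reversed range = last element of the filtered range
  rw [hr, loopA_eq_find? tokens R.reverse (fun j hj => hinr j (List.mem_reverse.mp hj)),
      find?_eq_head?_filter', List.filter_reverse, List.head?_reverse]
  -- B side: nested fold = running max over the filtered range
  rw [show (fun acc cue => R.foldl (stepB tokens cue) acc)
        = (fun acc cue => (R.filter (fun j => decide (PySem.List.pyGet? tokens j = some cue))).foldl max acc)
      from funext fun acc => funext fun cue => innerB_eq tokens cue R acc]
  rw [outer_eq_filter]
  simp only [any_eq_isCueAt]
  -- case on the filtered list, from the right
  rcases List.eq_nil_or_concat (R.filter (isCueAt tokens)) with hnil | ⟨F, m, hFm⟩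
  · rw [hnil]; simp
  · rw [hFm, List.concat_eq_append]
    have hpw : (R.filter (isCueAt tokens)).Pairwise (· < ·) :=
      List.Pairwise.sublist List.filter_sublist (PySem.List.pairwise_lt_pyRange_one _ _)
    rw [hFm, List.concat_eq_append, List.pairwise_append] at hpw
    have hmem : m ∈ R.filter (isCueAt tokens) := by rw [hFm]; simp
    have hmcue : isCueAt tokens m = true := List.of_mem_filter hmem
    have hm0 : 0 ≤ m := by
      have := (PySem.List.mem_pyRange_one.mp (List.mem_filter.mp hmem).1).1
      omega
    rw [foldl_max_concat_sorted F m (fun y hy => hpw.2.2 y hy m (by simp)) (by omega)]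
    rw [if_neg (by omega)]
    rw [List.getLast?_concat]
    unfold isCueAt at hmcue
    cases hg : PySem.List.pyGet? tokens m with
    | none => rw [hg] at hmcue; simp at hmcue
    | some w => simp [hg]
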